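-- pv_equiv track=rewrite | github.com/faid-terence/testing_python_1_2 | python_test_1.py | is_valid_string
-- ===== SOURCE A (Python) =====
-- def is_valid_string(s):
--     if len(s) < 6:
--         return False
--     digits = [char for char in s if char.isdigit()]
--     if len(digits) < 2 or len(digits) > 3:
--         return False
--     digit_positions = []
--     for i, char in enumerate(s):
--         if char.isdigit():
--             digit_positions.append(i)
--
--     for i in range(len(digit_positions) - 1):
--         if digit_positions[i + 1] - digit_positions[i] <= 1:
--             return False
--
--     return True
-- ===== SOURCE B (Python) =====
-- def is_valid_string(s):
--     count = 0
--     prev = None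
--     for i, ch in enumerate(s):
--         if ch.isdigit():
--             if prev is not None and i - prev <= 1:
--                 return False
--             prev = i
--             count += 1
--     return len(s) >= 6 and 2 <= count <= 3
-- ===== Notes on version B (the rewrite author's own statement) =====
-- stated objective: simpler
-- what changed: Replaced A's four passes (filter digits, build a positions list, re-scan it for gaps, plus the length check) with one online pass maintaining a digit count and the previous digit's index.
import Mathlib
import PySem

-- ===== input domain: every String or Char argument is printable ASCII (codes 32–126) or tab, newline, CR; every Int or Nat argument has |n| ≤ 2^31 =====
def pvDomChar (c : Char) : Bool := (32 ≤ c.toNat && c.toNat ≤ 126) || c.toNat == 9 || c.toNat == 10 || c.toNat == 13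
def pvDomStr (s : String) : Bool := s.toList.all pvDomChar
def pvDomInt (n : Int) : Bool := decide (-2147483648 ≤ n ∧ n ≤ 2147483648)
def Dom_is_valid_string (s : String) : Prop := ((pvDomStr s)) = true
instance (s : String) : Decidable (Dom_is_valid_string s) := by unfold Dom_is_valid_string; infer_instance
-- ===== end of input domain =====

-- B replaces A's multi-pass structure (filter digits, build a positions list, re-scan it
-- for gaps) by one online pass keeping a digit count and the previous digit's index: simpler.

-- ===== PORT A =====
-- 'for i in range(len(pos)-1): if pos[i+1]-pos[i] <= 1: return False / return True'
-- ported as the obvious adjacent-pair recursion over the positions list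
def aGapCheck : List Int → Bool
  | a :: b :: t => if b - a ≤ 1 then false else aGapCheck (b :: t)
  | _ => true

def is_valid_string (s : String) : Bool :=
  let l := s.toList
  if l.length < 6 then false
  else
    let digits := l.filter (fun c => PySem.Chars.isdigit c)
    if digits.length < 2 || digits.length > 3 then false
    else
      let digit_positions := (PySem.List.enumerate l 0).foldl
        (fun acc p => if PySem.Chars.isdigit p.2 then acc ++ [p.1] else acc) ([] : List Int)
      aGapCheck digit_positions

-- ===== PORT B =====
-- one pass over enumerate(s): prev index of a digit (Option) and running count
def bLoop (n : Nat) : List (Int × Char) → Option Int → Nat → Bool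
  | [], _, cnt => decide (6 ≤ n) && (decide (2 ≤ cnt) && decide (cnt ≤ 3))
  | (i, c) :: t, prev, cnt =>
    if PySem.Chars.isdigit c then
      match prev with
      | some p => if i - p ≤ 1 then false else bLoop n t (some i) (cnt + 1)
      | none => bLoop n t (some i) (cnt + 1)
    else bLoop n t prev cnt

def is_valid_string_alt (s : String) : Bool :=
  bLoop s.toList.length (PySem.List.enumerate s.toList 0) none 0

-- ===== PRECONDITION & SPEC =====
def Spec_is_valid_string (s : String) (out : Bool) : Prop := out = is_valid_string_alt s
instance (s : String) (out : Bool) : Decidable (Spec_is_valid_string s out) := by unfold Spec_is_valid_string; infer_instance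

-- ===== CLAIM (what is proved, stated in full; the proofs are below) =====
def Claim_equal_is_valid_string : Prop := ∀ (s : String), Dom_is_valid_string s → Spec_is_valid_string s (is_valid_string s)

-- ===== LEMMAS AND PROOFS =====

-- digit positions of l when enumeration starts at offset k
def dPos (l : List Char) (k : Int) : List Int :=
  ((PySem.List.enumerate l k).filter (fun p => PySem.Chars.isdigit p.2)).map (·.1)

def optList : Option Int → List Int
  | none => []
  | some p => [p]

theorem dPos_nil (k : Int) : dPos [] k = [] := rfl

theorem dPos_cons (c : Char) (t : List Char) (k : Int) :
    dPos (c :: t) k = if PySem.Chars.isdigit c then k :: dPos t (k + 1) else dPos t (k + 1) := by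
  simp [dPos, PySem.List.enumerate_cons, List.filter_cons]
  split_ifs <;> simp

theorem length_dPos (l : List Char) (k : Int) :
    (dPos l k).length = (l.filter (fun c => PySem.Chars.isdigit c)).length := by
  induction l generalizing k with
  | nil => rfl
  | cons c t ih =>
    rw [dPos_cons, List.filter_cons]
    split_ifs with h <;> simp [ih]

theorem bLoop_eq (n : Nat) (l : List Char) (k : Int) (prev : Option Int) (cnt : Nat) :
    bLoop n (PySem.List.enumerate l k) prev cnt =
      (aGapCheck (optList prev ++ dPos l k) &&
        (decide (6 ≤ n) && (decide (2 ≤ cnt + (dPos l k).length) && decide (cnt + (dPos l k).length ≤ 3)))) := by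
  induction l generalizing k prev cnt with
  | nil =>
    cases prev <;> simp [PySem.List.enumerate_nil, bLoop, dPos_nil, optList, aGapCheck]
  | cons c t ih =>
    rw [PySem.List.enumerate_cons, dPos_cons]
    by_cases hd : PySem.Chars.isdigit c
    · cases prev with
      | none =>
        simp only [bLoop, hd, if_pos, optList, List.nil_append]
        rw [ih]
        simp only [optList]
        have hnum : cnt + 1 + (dPos t (k + 1)).length = cnt + ((dPos t (k + 1)).length + 1) := by
          omega
        rw [hnum, List.singleton_append]
        simp only [List.length_cons]
        rfl
      | some p =>
        simp only [bLoop, hd, if_pos, optList, List.singleton_append]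
        by_cases hg : k - p ≤ 1
        · simp [hg, aGapCheck]
        · simp only [hg, if_neg, not_false_iff]
          rw [ih]
          simp only [optList, List.singleton_append]
          have hnum : cnt + 1 + (dPos t (k + 1)).length = cnt + ((dPos t (k + 1)).length + 1) := by
            omega
          rw [hnum]
          simp only [aGapCheck, hg, if_neg, not_false_iff, List.length_cons]
          rfl
    · simp only [bLoop, hd, Bool.false_eq_true, if_neg, not_false_iff]
      rw [ih]

theorem alt_eq (s : String) :
    is_valid_string_alt s =
      (aGapCheck (dPos s.toList 0) &&
        (decide (6 ≤ s.toList.length) &&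
          (decide (2 ≤ (dPos s.toList 0).length) && decide ((dPos s.toList 0).length ≤ 3)))) := by
  rw [is_valid_string_alt, bLoop_eq]
  simp [optList]

-- ===== VERDICT (by name: the statement is the Claim_ definition above) =====
theorem is_valid_string_spec : Claim_equal_is_valid_string := by
  intro s _
  unfold Spec_is_valid_string
  rw [alt_eq]
  unfold is_valid_string
  simp only [PySem.List.foldl_append_if, List.nil_append]
  have hlen := length_dPos s.toList 0
  split_ifs with h1 h2
  · rw [decide_eq_false (by omega : ¬ 6 ≤ s.toList.length)]
    simp
  · rw [Bool.or_eq_true, decide_eq_true_iff, decide_eq_true_iff] at h2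
    rw [← hlen] at h2
    have : ¬ (2 ≤ (dPos s.toList 0).length ∧ (dPos s.toList 0).length ≤ 3) := by omega
    rcases Decidable.not_and_iff_not_or_not.mp this with h | h
    · rw [decide_eq_false h]; simp
    · rw [decide_eq_false h]; simp
  · rw [Bool.or_eq_true, not_or, decide_eq_true_iff, decide_eq_true_iff] at h2
    rw [decide_eq_true (by omega : 6 ≤ s.toList.length),
        decide_eq_true (by omega : 2 ≤ (dPos s.toList 0).length),
        decide_eq_true (by omega : (dPos s.toList 0).length ≤ 3)]
    simp [dPos]
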